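-- pv_equiv track=rewrite | github.com/tuhina2313/gym-highway-IRL | utils.py | get_sorted_frequency
-- ===== SOURCE A (Python) =====
-- import collections
--
-- def get_sorted_frequency(R):
--     frequency = collections.Counter(R)
--     myKeys = list(frequency.keys())
--     myKeys.sort()
--     sorted_freq = {i: frequency[i] for i in myKeys}
--
--
--     x = list(sorted_freq.keys())
--     y = list(sorted_freq.values())
--     return x, y
-- ===== SOURCE B (Python) =====
-- def get_sorted_frequency(R):
--     s = sorted(R)
--     x, y = [], []
--     i, n = 0, len(s)
--     while i < n:
--         j = i + 1
--         while j < n and s[j] == s[i]: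
--             j += 1
--         x.append(s[i])
--         y.append(j - i)
--         i = j
--     return x, y
-- ===== Notes on version B (the rewrite author's own statement) =====
-- stated objective: alternative
-- what changed: Replaces the Counter hash table, key list, separate key sort and rebuilt dict with one sort of the whole list followed by a single linear pass counting runs of consecutive equal values.
import Mathlib
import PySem

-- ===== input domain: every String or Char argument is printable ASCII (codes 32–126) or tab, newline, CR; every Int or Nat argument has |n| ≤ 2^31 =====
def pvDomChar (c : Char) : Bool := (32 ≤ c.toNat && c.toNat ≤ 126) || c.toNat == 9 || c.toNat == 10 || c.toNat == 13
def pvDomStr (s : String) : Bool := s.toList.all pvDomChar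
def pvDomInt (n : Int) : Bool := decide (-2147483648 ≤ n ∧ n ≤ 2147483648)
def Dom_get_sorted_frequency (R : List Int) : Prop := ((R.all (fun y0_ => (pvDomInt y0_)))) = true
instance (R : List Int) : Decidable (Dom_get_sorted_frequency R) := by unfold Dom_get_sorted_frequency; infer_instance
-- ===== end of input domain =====

-- B replaces A's Counter + key-sort + rebuilt dict with one sort of the whole list
-- followed by a single linear pass over consecutive runs (objective: alternative algorithm).

-- ===== PORT A =====
def get_sorted_frequency (R : List Int) : List Int × List Int :=
  let frequency := PySem.Dict.counter R
  let myKeys := frequency.keys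
  let myKeys := PySem.List.sorted myKeys (fun x => x)
  let sorted_freq := myKeys.foldl (fun d i => d.insert i (frequency.getD i 0)) PySem.Dict.empty
  let x := sorted_freq.keys
  let y := sorted_freq.values
  (x, y)

-- ===== PORT B =====
-- one pass over the sorted list: each step consumes one run of equal values
-- (the run scan is Source B's inner `while` loop; one recursive call per outer iteration)
def pvRuns : List Int → List Int × List Int
  | [] => ([], [])
  | v :: t =>
    let rest := t.dropWhile (fun w => w == v)
    let p := pvRuns rest
    (v :: p.1, (((t.takeWhile (fun w => w == v)).length : Int) + 1) :: p.2)
termination_by s => s.length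
decreasing_by
  simpa using Nat.lt_succ_of_le (List.length_dropWhile_le _ t)

def get_sorted_frequency_alt (R : List Int) : List Int × List Int :=
  pvRuns (PySem.List.sorted R (fun x => x))

-- ===== PRECONDITION & SPEC =====
def Spec_get_sorted_frequency (R : List Int) (out : List Int × List Int) : Prop := out = get_sorted_frequency_alt R
instance (R : List Int) (out : List Int × List Int) : Decidable (Spec_get_sorted_frequency R out) := by unfold Spec_get_sorted_frequency; infer_instance

-- ===== CLAIM (what is proved, stated in full; the proofs are below) =====
def Claim_equal_get_sorted_frequency : Prop := ∀ (R : List Int), Dom_get_sorted_frequency R → Spec_get_sorted_frequency R (get_sorted_frequency R)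

-- ===== LEMMAS AND PROOFS =====

-- unfolded cons equation of pvRuns (its own definition, stated without the lets)
theorem pvRuns_cons (v : Int) (t : List Int) :
    pvRuns (v :: t) = (v :: (pvRuns (t.dropWhile (fun w => w == v))).1,
      (((t.takeWhile (fun w => w == v)).length : Int) + 1)
        :: (pvRuns (t.dropWhile (fun w => w == v))).2) := by
  rw [pvRuns]

-- On a nondecreasing list, pvRuns returns (distinct values in strictly increasing order,
-- their multiplicities): the three facts the equivalence needs, proved together.
theorem pvRuns_spec (s : List Int) (hs : s.Pairwise (· ≤ ·)) :
    (pvRuns s).1.Pairwise (· < ·) ∧ (∀ x, x ∈ (pvRuns s).1 ↔ x ∈ s) ∧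
    (pvRuns s).2 = (pvRuns s).1.map (fun k => (s.count k : Int)) := by
  match s with
  | [] => simp [pvRuns]
  | v :: t => ?_
  case _ =>
    rw [List.pairwise_cons] at hs
    obtain ⟨hv, ht⟩ := hs
    have hrest_sub : (t.dropWhile (fun w => w == v)).Sublist t := List.dropWhile_sublist _
    have hrest_pw : (t.dropWhile (fun w => w == v)).Pairwise (· ≤ ·) := ht.sublist hrest_sub
    have hrun : ∀ x ∈ t.takeWhile (fun w => w == v), x = v := by
      intro x hx
      have hb : (x == v) = true :=
        List.mem_takeWhile_imp (p := fun w => w == v) (l := t) hx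
      exact eq_of_beq hb
    -- every element of the remainder is strictly above v
    have hlt : ∀ x ∈ t.dropWhile (fun w => w == v), v < x := by
      have h0 := List.head?_dropWhile_not (fun w => w == v) t
      have hsub := hrest_sub
      have hpw := hrest_pw
      generalize t.dropWhile (fun w => w == v) = rest at h0 hsub hpw ⊢
      cases rest with
      | nil => intro x hx; simp at hx
      | cons h r =>
        intro x hx
        have hh_mem : h ∈ t := hsub.mem List.mem_cons_self
        have hne : h ≠ v := by simpa using h0
        have hvh : v < h := lt_of_le_of_ne (hv h hh_mem) (Ne.symm hne)
        rcases List.mem_cons.mp hx with rfl | hx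
        · exact hvh
        · exact lt_of_lt_of_le hvh ((List.pairwise_cons.mp hpw).1 x hx)
    obtain ⟨ih1, ih2, ih3⟩ := pvRuns_spec (t.dropWhile (fun w => w == v)) hrest_pw
    have ht_split : t.takeWhile (fun w => w == v) ++ t.dropWhile (fun w => w == v) = t :=
      List.takeWhile_append_dropWhile
    refine ⟨?_, ?_, ?_⟩
    · -- strictly increasing heads
      rw [pvRuns_cons]
      exact List.pairwise_cons.mpr ⟨fun x hx => hlt x ((ih2 x).mp hx), ih1⟩
    · -- same membership as v :: t
      intro x
      rw [pvRuns_cons]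
      simp only [List.mem_cons, ih2]
      constructor
      · rintro (rfl | hx)
        · exact Or.inl rfl
        · exact Or.inr (hrest_sub.mem hx)
      · rintro (rfl | hx)
        · exact Or.inl rfl
        · rw [← ht_split] at hx
          rcases List.mem_append.mp hx with hx | hx
          · exact Or.inl (hrun x hx)
          · exact Or.inr hx
    · -- counts
      have hcount_v : (v :: t).count v = (t.takeWhile (fun w => w == v)).length + 1 := by
        have h1 : (t.takeWhile (fun w => w == v)).count v
            = (t.takeWhile (fun w => w == v)).length :=
          List.count_eq_length.mpr (fun x hx => by simp [hrun x hx])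
        have h2 : (t.dropWhile (fun w => w == v)).count v = 0 :=
          List.count_eq_zero.mpr (fun hmem => lt_irrefl v (hlt v hmem))
        rw [List.count_cons_self]
        conv_lhs => rw [← ht_split]
        rw [List.count_append, h1, h2]
      have hcount_rest : ∀ k ∈ (pvRuns (t.dropWhile (fun w => w == v))).1,
          (v :: t).count k = (t.dropWhile (fun w => w == v)).count k := by
        intro k hk
        have hkv : v < k := hlt k ((ih2 k).mp hk)
        have h1 : (t.takeWhile (fun w => w == v)).count k = 0 :=
          List.count_eq_zero.mpr
            (fun hmem => absurd (hrun k hmem) (ne_of_gt hkv))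
        rw [List.count_cons_of_ne (show v ≠ k by omega)]
        conv_lhs => rw [← ht_split]
        rw [List.count_append, h1, Nat.zero_add]
      rw [pvRuns_cons]
      simp only [List.map_cons]
      refine congrArg₂ (· :: ·) ?_ ?_
      · rw [hcount_v]; push_cast; ring
      · rw [ih3]
        exact (List.map_congr_left (fun k hk => by rw [hcount_rest k hk])).symm
termination_by s.length
decreasing_by
  simpa using Nat.lt_succ_of_le (List.length_dropWhile_le _ t)

-- A's result in closed form: the sorted distinct values with their counts.
theorem portA_eq (R : List Int) :
    get_sorted_frequency R =
      (PySem.List.sorted (PySem.Set.ofList R) (fun x => x),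
       (PySem.List.sorted (PySem.Set.ofList R) (fun x => x)).map (fun k => (R.count k : Int))) := by
  unfold get_sorted_frequency
  simp only [PySem.Dict.keys_counter]
  set K := PySem.List.sorted (PySem.Set.ofList R) (fun x => x) with hK
  have hnodup : K.Nodup :=
    ((PySem.List.sorted_perm (PySem.Set.ofList R) (fun x => x) false).nodup_iff).mpr
      (PySem.Set.nodup_ofList R)
  have hitems := PySem.Dict.items_foldl_insert_fresh K (fun i => i)
      (fun i => (PySem.Dict.counter R).getD i 0) PySem.Dict.empty
      (fun a _ => rfl) (by simpa using hnodup)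
  refine Prod.ext ?_ ?_
  · simp only [PySem.Dict.keys, hitems]
    simp [PySem.Dict.empty, Function.comp_def]
  · simp only [PySem.Dict.values, hitems]
    simp [PySem.Dict.empty, PySem.Dict.getD_counter, Function.comp_def]

-- B's result in the same closed form.
theorem portB_eq (R : List Int) :
    get_sorted_frequency_alt R =
      (PySem.List.sorted (PySem.Set.ofList R) (fun x => x),
       (PySem.List.sorted (PySem.Set.ofList R) (fun x => x)).map (fun k => (R.count k : Int))) := by
  unfold get_sorted_frequency_alt
  set s := PySem.List.sorted R (fun x => x) with hs
  have hperm : s.Perm R := PySem.List.sorted_perm R (fun x => x) false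
  obtain ⟨h1, h2, h3⟩ := pvRuns_spec s (PySem.List.sorted_pairwise R (fun x => x))
  have hnodup1 : (pvRuns s).1.Nodup := h1.imp ne_of_lt
  -- (pvRuns s).1 is the strictly increasing enumeration of R's distinct values
  have hperm1 : (pvRuns s).1.Perm (PySem.Set.ofList R) := by
    rw [List.perm_ext_iff_of_nodup hnodup1 (PySem.Set.nodup_ofList R)]
    intro x
    rw [h2 x, PySem.Set.mem_ofList, hperm.mem_iff]
  have hfst : PySem.List.sorted (PySem.Set.ofList R) (fun x => x) = (pvRuns s).1 :=
    PySem.List.sorted_eq_of_perm_of_pairwise_lt _ _ _ hperm1 h1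
  refine Prod.ext hfst.symm ?_
  show (pvRuns s).2 = _
  rw [h3, hfst]
  exact List.map_congr_left (fun k _ => by rw [hperm.count_eq])

-- ===== VERDICT (by name: the statement is the Claim_ definition above) =====
theorem get_sorted_frequency_spec : Claim_equal_get_sorted_frequency := by
  intro R _
  show get_sorted_frequency R = get_sorted_frequency_alt R
  rw [portA_eq, portB_eq]
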